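-- pv_equiv track=rewrite | github.com/IshitaTakeshi/CodingTheory | prefixcode.py | isprefixcode
-- ===== SOURCE A (Python) =====
-- def dangling_suffixes(code1, code2):
--     def suffixes(code, word):
--         N = len(word)
--         s = set()
--         for c in code:
--             if c == word:
--                 continue
--             if c.startswith(word):
--                 s.add(c[N:])
--         return s
--
--     ss = set()
--     for c1 in code1:
--         ss |= suffixes(code2, c1)
--     for c2 in code2:
--         ss |= suffixes(code1, c2)
--     return ss
--
-- def isprefixcode(code):
--     S0 = set(code)
--     S = dangling_suffixes(S0, S0)
--     D = dangling_suffixes(S0, S)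
--
--     while S != (S | D):
--         S = S | D
--         D = dangling_suffixes(S0, S)
--     return len(S & S0) == 0
-- ===== SOURCE B (Python) =====
-- def isprefixcode(code):
--     words = set(code)
--     # materialize the suffix graph once: nodes = all nonempty suffixes of codewords,
--     # adjacency = the dangling suffixes one pairing step produces from a node
--     nodes = {c[i:] for c in words for i in range(len(c))}
--     adj = {}
--     for s in nodes:
--         nbrs = set()
--         for x in words:
--             if x != s:
--                 if x.startswith(s):
--                     nbrs.add(x[len(s):])
--                 if s.startswith(x):
--                     nbrs.add(s[len(x):])
--         adj[s] = nbrs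
--     # seed suffixes: one codeword a proper prefix of another
--     seeds = {c[len(w):] for c in words for w in words if c != w and c.startswith(w)}
--     # one depth-first search over the prebuilt graph, early exit on a codeword node
--     stack = list(seeds)
--     visited = set()
--     while stack:
--         s = stack.pop()
--         if s in visited:
--             continue
--         visited.add(s)
--         if s in words:
--             return False
--         stack.extend(adj[s])
--     return True
-- ===== Notes on version B (the rewrite author's own statement) =====
-- stated objective: alternative
-- what changed: A saturates a set to a fixpoint by recomputing the dangling-suffix set of the WHOLE accumulated set every round and intersects with the code at the end; B instead materializes the suffix graph once (nodes = all nonempty suffixes of codewords, adjacency dict) and answers with a single depth-first search over it, early-exiting as soon as a codeword node is reached.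
import Mathlib
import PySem

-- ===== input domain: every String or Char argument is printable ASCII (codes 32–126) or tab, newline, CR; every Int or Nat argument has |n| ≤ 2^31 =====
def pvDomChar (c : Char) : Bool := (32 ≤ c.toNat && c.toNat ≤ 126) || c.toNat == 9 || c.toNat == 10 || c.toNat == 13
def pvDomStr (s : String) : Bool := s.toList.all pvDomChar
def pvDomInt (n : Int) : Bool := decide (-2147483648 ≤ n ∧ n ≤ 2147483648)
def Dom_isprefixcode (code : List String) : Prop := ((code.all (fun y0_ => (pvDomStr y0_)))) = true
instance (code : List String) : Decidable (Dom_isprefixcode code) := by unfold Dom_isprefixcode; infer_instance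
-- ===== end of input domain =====

-- B replaces A's recompute-the-whole-set fixpoint rounds by an explicit suffix GRAPH built once
-- (nodes = all nonempty suffixes of codewords, adjacency dict) followed by a single depth-first
-- search with a stack and a visited set (objective: alternative algorithmic structure).
-- Both programs' loops are ported with an explicit fuel counter (a totality guard only;
-- proved sufficient below, so neither port's behaviour depends on it).

-- fuel bound used by A's loop port: 1 + total length of all codewords
-- (an upper bound on the number of distinct nonempty suffixes of codewords)
def pvBound (code : List String) : Nat := (code.map (fun c => c.toList.length)).sum

def pvFuel (code : List String) : Nat := pvBound code + 1

-- ===== PORT A =====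
-- inner helper `suffixes(code, word)` of dangling_suffixes
def pvSuffixesA (code : List String) (word : String) : PySem.Set String :=
  code.foldl (fun s c =>
    if c == word then s
    else if PySem.Str.startswith c word then
      PySem.Set.add s (PySem.Str.slice c (some (PySem.Str.len word)) none)
    else s) PySem.Set.empty

-- dangling_suffixes(code1, code2)
def pvDangA (code1 code2 : List String) : PySem.Set String :=
  let ss := code1.foldl (fun ss c1 => PySem.Set.union ss (pvSuffixesA code2 c1)) PySem.Set.empty
  code2.foldl (fun ss c2 => PySem.Set.union ss (pvSuffixesA code1 c2)) ss

-- `while S != (S | D): S = S | D; D = dangling_suffixes(S0, S)` (D recomputed at loop entry)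
def pvLoopA (S0 : PySem.Set String) : Nat → PySem.Set String → PySem.Set String
  | 0, S => S
  | f + 1, S =>
      let D := pvDangA S0 S
      if PySem.Set.equal S (PySem.Set.union S D) then S
      else pvLoopA S0 f (PySem.Set.union S D)

def isprefixcode (code : List String) : Bool :=
  let S0 := PySem.Set.ofList code
  let S := pvLoopA S0 (pvFuel code) (pvDangA S0 S0)
  PySem.Set.len (PySem.Set.inter S S0) == 0

-- ===== PORT B =====
-- fuel for B's DFS loop (proved sufficient below)
def pvFuelB (code : List String) : Nat := (pvBound code + 1) * (pvBound code + 1)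

-- neighbour set of one node s: the dangling suffixes one pairing step with a codeword produces
def pvSuccs (words : PySem.Set String) (s : String) : PySem.Set String :=
  words.foldl (fun out x =>
    if x == s then out
    else
      let out := if PySem.Str.startswith x s then
          PySem.Set.add out (PySem.Str.slice x (some (PySem.Str.len s)) none) else out
      if PySem.Str.startswith s x then
        PySem.Set.add out (PySem.Str.slice s (some (PySem.Str.len x)) none) else out)
    PySem.Set.empty

-- nodes = {c[i:] for c in words for i in range(len(c))}: all nonempty suffixes of codewords
def pvNodes (words : PySem.Set String) : PySem.Set String :=
  words.foldl (fun acc c =>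
    (PySem.List.pyRange 0 (PySem.Str.len c) 1).foldl (fun acc i =>
      PySem.Set.add acc (PySem.Str.slice c (some i) none)) acc) PySem.Set.empty

-- adj = {s: nbrs(s) for s in nodes}, built once
def pvAdj (words : PySem.Set String) : PySem.Dict String (PySem.Set String) :=
  (pvNodes words).foldl (fun d s => d.insert s (pvSuccs words s)) PySem.Dict.empty

-- seeds = {c[len(w):] for c in words for w in words if c != w and c.startswith(w)}
def pvInitB (S0 : PySem.Set String) : PySem.Set String :=
  S0.foldl (fun acc c =>
    S0.foldl (fun acc w =>
      if c != w && PySem.Str.startswith c w then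
        PySem.Set.add acc (PySem.Str.slice c (some (PySem.Str.len w)) none)
      else acc) acc) PySem.Set.empty

-- the DFS `while stack:` loop; Python pops from the END of the list (stack.pop()).
-- adj.getD: every popped node is a key of adj (stack ⊆ nodes, proved below), so Python's
-- adj[s] never raises and the getD default is never taken.
def pvDFS (words : PySem.Set String) (adj : PySem.Dict String (PySem.Set String)) :
    Nat → PySem.Set String → List String → Bool
  | 0, _, _ => true
  | f + 1, visited, stack =>
      match stack.getLast? with
      | none => true
      | some s =>
          let rest := stack.dropLast
          if s ∈ visited then pvDFS words adj f visited rest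
          else
            let visited' := PySem.Set.add visited s
            if s ∈ words then false
            else pvDFS words adj f visited' (rest ++ adj.getD s PySem.Set.empty)

def isprefixcode_alt (code : List String) : Bool :=
  let words := PySem.Set.ofList code
  let adj := pvAdj words
  pvDFS words adj (pvFuelB code) PySem.Set.empty (pvInitB words)

-- ===== PRECONDITION & SPEC =====
def Spec_isprefixcode (code : List String) (out : Bool) : Prop := out = isprefixcode_alt code
instance (code : List String) (out : Bool) : Decidable (Spec_isprefixcode code out) := by unfold Spec_isprefixcode; infer_instance

-- ===== CLAIM (what is proved, stated in full; the proofs are below) =====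
def Claim_equal_isprefixcode : Prop := ∀ (code : List String), Dom_isprefixcode code → Spec_isprefixcode code (isprefixcode code)

-- ===== LEMMAS AND PROOFS =====

-- x[len(w):]
def pvCut (x w : String) : String := PySem.Str.slice x (some (PySem.Str.len w)) none

-- "y is a dangling suffix generated in one step from s against the codeword set S0"
def pvPG (S0 : PySem.Set String) (s y : String) : Prop :=
  ∃ x ∈ S0, x ≠ s ∧
    ((PySem.Str.startswith x s = true ∧ y = pvCut x s) ∨
     (PySem.Str.startswith s x = true ∧ y = pvCut s x))

-- the closure both programs compute: all dangling suffixes reachable from codeword pairs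
inductive pvReach (S0 : PySem.Set String) : String → Prop
  | base {s y : String} : s ∈ S0 → pvPG S0 s y → pvReach S0 y
  | step {s y : String} : pvReach S0 s → pvPG S0 s y → pvReach S0 y

-- candidate universe: nonempty suffixes of codewords
def pvOK (code : List String) (y : String) : Prop :=
  y.toList ≠ [] ∧ ∃ c ∈ code, y.toList <:+ c.toList

theorem pvCut_toList (x w : String) : (pvCut x w).toList = x.toList.drop w.toList.length := by
  simp [pvCut, pysem, PySem.List.slice_from]

-- generic: membership through a foldl whose step adds elements described by P
theorem pv_mem_foldl {α β : Type} [BEq α] (f : PySem.Set α → β → PySem.Set α)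
    (P : β → α → Prop) (hf : ∀ acc a y, y ∈ f acc a ↔ y ∈ acc ∨ P a y) :
    ∀ (l : List β) (init : PySem.Set α) (y : α),
      y ∈ l.foldl f init ↔ y ∈ init ∨ ∃ a ∈ l, P a y := by
  intro l
  induction l with
  | nil => intro init y; simp
  | cons a t ih =>
      intro init y
      rw [List.foldl_cons, ih, hf]
      constructor
      · rintro (⟨h | h⟩ | ⟨b, hb, hP⟩)
        · exact Or.inl h
        · exact Or.inr ⟨a, by simp, h⟩
        · exact Or.inr ⟨b, by simp [hb], hP⟩
      · rintro (h | ⟨b, hb, hP⟩)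
        · exact Or.inl (Or.inl h)
        · rcases List.mem_cons.mp hb with rfl | hb
          · exact Or.inl (Or.inr hP)
          · exact Or.inr ⟨b, hb, hP⟩

-- generic: Nodup through a foldl whose step preserves Nodup
theorem pv_nodup_foldl {α β : Type} (f : PySem.Set α → β → PySem.Set α)
    (hf : ∀ acc a, acc.Nodup → (f acc a).Nodup) :
    ∀ (l : List β) (init : PySem.Set α), init.Nodup → (l.foldl f init).Nodup := by
  intro l
  induction l with
  | nil => intro init h; simpa
  | cons a t ih => intro init h; exact ih _ (hf _ _ h)

theorem pv_mem_addIf {α : Type} [BEq α] [LawfulBEq α] (acc : PySem.Set α) (b : Bool) (v y : α) :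
    (y ∈ if b then acc.add v else acc) ↔ y ∈ acc ∨ (b = true ∧ y = v) := by
  cases b <;> simp [PySem.Set.mem_add]

theorem pv_mem_suffA (code : List String) (word : String) (y : String) :
    y ∈ pvSuffixesA code word ↔
      ∃ c ∈ code, c ≠ word ∧ PySem.Str.startswith c word = true ∧ y = pvCut c word := by
  unfold pvSuffixesA
  rw [pv_mem_foldl _ (fun c y => c ≠ word ∧ PySem.Str.startswith c word = true ∧ y = pvCut c word)]
  · simp [PySem.Set.empty]
  · intro acc c z
    by_cases hc : c = word
    · simp [hc]
    · have hc' : (c == word) = false := by simp [hc]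
      simp only [hc', Bool.false_eq_true, if_false, pv_mem_addIf, pvCut]
      tauto

theorem pv_mem_dangA (code1 code2 : List String) (y : String) :
    y ∈ pvDangA code1 code2 ↔
      (∃ w ∈ code1, ∃ c ∈ code2, c ≠ w ∧ PySem.Str.startswith c w = true ∧ y = pvCut c w) ∨
      (∃ w ∈ code2, ∃ c ∈ code1, c ≠ w ∧ PySem.Str.startswith c w = true ∧ y = pvCut c w) := by
  unfold pvDangA
  rw [pv_mem_foldl _ (fun w y => y ∈ pvSuffixesA code1 w)
        (by intro acc a z; rw [PySem.Set.mem_union]),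
      pv_mem_foldl _ (fun w y => y ∈ pvSuffixesA code2 w)
        (by intro acc a z; rw [PySem.Set.mem_union])]
  simp only [PySem.Set.empty, List.not_mem_nil, false_or]
  constructor
  · rintro (⟨w, hw, hy⟩ | ⟨w, hw, hy⟩)
    · exact Or.inl ⟨w, hw, (pv_mem_suffA _ _ _).mp hy⟩
    · exact Or.inr ⟨w, hw, (pv_mem_suffA _ _ _).mp hy⟩
  · rintro (⟨w, hw, hc⟩ | ⟨w, hw, hc⟩)
    · exact Or.inl ⟨w, hw, (pv_mem_suffA _ _ _).mpr hc⟩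
    · exact Or.inr ⟨w, hw, (pv_mem_suffA _ _ _).mpr hc⟩

theorem pv_nodup_dangA (code1 code2 : List String) : (pvDangA code1 code2).Nodup := by
  unfold pvDangA
  apply pv_nodup_foldl _ (fun acc a h => PySem.Set.nodup_union _ _ h)
  apply pv_nodup_foldl _ (fun acc a h => PySem.Set.nodup_union _ _ h)
  simp [PySem.Set.empty]

-- dang(S0, S) generates exactly one pvPG step from elements of S
theorem pv_mem_dangA_PG (S0 S : PySem.Set String) (y : String) :
    y ∈ pvDangA S0 S ↔ ∃ s ∈ S, pvPG S0 s y := by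
  rw [pv_mem_dangA]
  constructor
  · rintro (⟨w, hw, c, hc, hne, hsw, hy⟩ | ⟨w, hw, c, hc, hne, hsw, hy⟩)
    · exact ⟨c, hc, w, hw, fun h => hne h.symm, Or.inr ⟨hsw, hy⟩⟩
    · exact ⟨w, hw, c, hc, hne, Or.inl ⟨hsw, hy⟩⟩
  · rintro ⟨s, hs, x, hx, hne, (⟨hsw, hy⟩ | ⟨hsw, hy⟩)⟩
    · exact Or.inr ⟨s, hs, x, hx, hne, hsw, hy⟩
    · exact Or.inl ⟨x, hx, s, hs, fun h => hne h.symm, hsw, hy⟩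

theorem pv_mem_succs (words : PySem.Set String) (s y : String) :
    y ∈ pvSuccs words s ↔ pvPG words s y := by
  unfold pvSuccs pvPG
  rw [pv_mem_foldl _ (fun x y => x ≠ s ∧
      ((PySem.Str.startswith x s = true ∧ y = pvCut x s) ∨
       (PySem.Str.startswith s x = true ∧ y = pvCut s x)))]
  · simp [PySem.Set.empty]
  · intro acc x z
    by_cases hx : x = s
    · simp [hx]
    · have hx' : (x == s) = false := by simp [hx]
      simp only [hx', Bool.false_eq_true, if_false, pv_mem_addIf, pvCut]
      tauto

theorem pv_nodup_succs (words : PySem.Set String) (s : String) : (pvSuccs words s).Nodup := by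
  unfold pvSuccs
  apply pv_nodup_foldl
  · intro acc x h
    dsimp only
    split
    · exact h
    · split
      · split
        · exact PySem.Set.nodup_add _ _ (PySem.Set.nodup_add _ _ h)
        · exact PySem.Set.nodup_add _ _ h
      · split
        · exact PySem.Set.nodup_add _ _ h
        · exact h
  · simp [PySem.Set.empty]

theorem pv_mem_initB (S0 : PySem.Set String) (y : String) :
    y ∈ pvInitB S0 ↔ ∃ s ∈ S0, pvPG S0 s y := by
  unfold pvInitB
  rw [pv_mem_foldl _ (fun c y => ∃ w ∈ S0, c ≠ w ∧ PySem.Str.startswith c w = true ∧ y = pvCut c w)]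
  · simp only [PySem.Set.empty, List.not_mem_nil, false_or]
    constructor
    · rintro ⟨c, hc, w, hw, hne, hsw, hy⟩
      exact ⟨c, hc, w, hw, fun h => hne h.symm, Or.inr ⟨hsw, hy⟩⟩
    · rintro ⟨s, hs, x, hx, hne, (⟨hsw, hy⟩ | ⟨hsw, hy⟩)⟩
      · exact ⟨x, hx, s, hs, hne, hsw, hy⟩
      · exact ⟨s, hs, x, hx, fun h => hne h.symm, hsw, hy⟩
  · intro acc c z
    rw [pv_mem_foldl _ (fun w z => c ≠ w ∧ PySem.Str.startswith c w = true ∧ z = pvCut c w)]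
    · intro acc2 w z2
      by_cases hcw : c = w
      · simp [hcw]
      · have h1 : (c != w) = true := by simp [hcw]
        simp only [h1, Bool.true_and, pv_mem_addIf, pvCut]
        tauto

theorem pv_nodup_initB (S0 : PySem.Set String) : (pvInitB S0).Nodup := by
  unfold pvInitB
  apply pv_nodup_foldl
  · intro acc c h
    apply pv_nodup_foldl _ _ _ _ h
    intro acc2 w h2
    dsimp only
    split
    · exact PySem.Set.nodup_add _ _ h2
    · exact h2
  · simp [PySem.Set.empty]

-- membership in the node set: exactly the nonempty suffixes of codewords
theorem pv_mem_nodes (code : List String) (y : String) :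
    y ∈ pvNodes (PySem.Set.ofList code) ↔ pvOK code y := by
  unfold pvNodes
  rw [pv_mem_foldl _ (fun c y => ∃ i ∈ PySem.List.pyRange 0 (PySem.Str.len c) 1,
        y = PySem.Str.slice c (some i) none)]
  · simp only [PySem.Set.empty, List.not_mem_nil, false_or, PySem.Set.mem_ofList]
    constructor
    · rintro ⟨c, hc, i, hi, rfl⟩
      rw [PySem.List.mem_pyRange_one] at hi
      have hlen : PySem.Str.len c = (c.toList.length : Int) := by simp [pysem]
      rw [hlen] at hi
      have htl : (PySem.Str.slice c (some i) none).toList = c.toList.drop i.toNat := by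
        simp [pysem, PySem.List.slice_from _ hi.1]
      refine ⟨?_, c, hc, ?_⟩
      · rw [htl]
        simp only [ne_eq, List.drop_eq_nil_iff]
        omega
      · rw [htl]; exact List.drop_suffix _ _
    · rintro ⟨hne, c, hc, t, ht⟩
      refine ⟨c, hc, (t.length : Int), ?_, ?_⟩
      · rw [PySem.List.mem_pyRange_one]
        have hlen : PySem.Str.len c = (c.toList.length : Int) := by simp [pysem]
        have hcl : c.toList.length = t.length + y.toList.length := by
          rw [← ht, List.length_append]
        have hy : 0 < y.toList.length := List.length_pos_iff.mpr hne
        constructor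
        · exact Int.natCast_nonneg _
        · rw [hlen]; omega
      · apply String.toList_inj.mp
        rw [show (PySem.Str.slice c (some (t.length : Int)) none).toList
              = c.toList.drop t.length by simp [pysem, PySem.List.slice_from_natCast]]
        rw [← ht, List.drop_left]
  · intro acc c z
    rw [pv_mem_foldl _ (fun i z => z = PySem.Str.slice c (some i) none)]
    intro acc2 i z2
    rw [PySem.Set.mem_add]

theorem pv_nodup_nodes (words : PySem.Set String) : (pvNodes words).Nodup := by
  unfold pvNodes
  apply pv_nodup_foldl
  · intro acc c h
    apply pv_nodup_foldl _ _ _ _ h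
    intro acc2 i h2
    exact PySem.Set.nodup_add _ _ h2
  · simp [PySem.Set.empty]

-- lookup in the adjacency dict built by the foldl of inserts
theorem pv_getD_foldl_insert (g : String → PySem.Set String) :
    ∀ (l : List String) (d : PySem.Dict String (PySem.Set String)) (t : String),
      (l.foldl (fun d s => d.insert s (g s)) d).getD t PySem.Set.empty
        = if t ∈ l then g t else d.getD t PySem.Set.empty := by
  intro l
  induction l with
  | nil => intro d t; simp
  | cons a l ih =>
      intro d t
      rw [List.foldl_cons, ih]
      by_cases h : t ∈ l
      · simp [h]
      · by_cases ha : t = a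
        · simp [ha]
        · have hm : t ∉ a :: l := by simp [h, ha]
          rw [if_neg hm, PySem.Dict.getD_insert, if_neg ha, if_neg h]

theorem pv_adj_getD (words : PySem.Set String) (t : String) :
    (pvAdj words).getD t PySem.Set.empty
      = if t ∈ pvNodes words then pvSuccs words t else PySem.Set.empty := by
  unfold pvAdj
  rw [pv_getD_foldl_insert]
  split <;> simp [PySem.Dict.getD_empty]

-- one pvPG step stays inside the universe of nonempty codeword suffixes
theorem pv_PG_OK (code : List String) (s y : String)
    (hs : s ∈ PySem.Set.ofList code ∨ pvOK code s)
    (h : pvPG (PySem.Set.ofList code) s y) : pvOK code y := by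
  obtain ⟨x, hx, hne, hcase⟩ := h
  rw [PySem.Set.mem_ofList] at hx
  have hnel : x.toList ≠ s.toList := fun h => hne (String.toList_inj.mp h)
  rcases hcase with ⟨hsw, hy⟩ | ⟨hsw, hy⟩
  · -- y = x[len s:], a nonempty suffix of the codeword x
    rw [PySem.Str.startswith_eq, PySem.Chars.startswith_iff] at hsw
    have hlt : s.toList.length < x.toList.length := by
      rcases Nat.lt_or_ge s.toList.length x.toList.length with h | h
      · exact h
      · exact absurd (hsw.eq_of_length (Nat.le_antisymm hsw.length_le h)) (fun he => hnel he.symm)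
    constructor
    · rw [hy, pvCut_toList]
      simp only [ne_eq, List.drop_eq_nil_iff]
      omega
    · refine ⟨x, hx, ?_⟩
      rw [hy, pvCut_toList]
      exact List.drop_suffix _ _
  · -- y = s[len x:], a nonempty suffix of s, itself a suffix of a codeword
    rw [PySem.Str.startswith_eq, PySem.Chars.startswith_iff] at hsw
    have hlt : x.toList.length < s.toList.length := by
      rcases Nat.lt_or_ge x.toList.length s.toList.length with h | h
      · exact h
      · exact absurd (hsw.eq_of_length (Nat.le_antisymm hsw.length_le h)) hnel
    have hsOK : ∃ c ∈ code, s.toList <:+ c.toList := by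
      rcases hs with hs | ⟨_, hc⟩
      · exact ⟨s, (PySem.Set.mem_ofList _ _).mp hs, List.suffix_rfl⟩
      · exact hc
    obtain ⟨c, hc, hsuf⟩ := hsOK
    constructor
    · rw [hy, pvCut_toList]
      simp only [ne_eq, List.drop_eq_nil_iff]
      omega
    · refine ⟨c, hc, ?_⟩
      rw [hy, pvCut_toList]
      exact (List.drop_suffix _ _).trans hsuf

-- a Nodup set of nonempty codeword suffixes has at most pvBound elements
theorem pv_card_le (code : List String) (S : PySem.Set String)
    (hnd : S.Nodup) (hOK : ∀ y ∈ S, pvOK code y) : S.length ≤ pvBound code := by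
  classical
  set UL : List (List Char) := code.flatMap (fun c => (List.range c.toList.length).map (fun i => c.toList.drop i)) with hUL
  have hULlen : UL.length = pvBound code := by
    rw [hUL, List.length_flatMap, pvBound]
    congr 1
    apply List.map_congr_left
    intro c _
    simp
  have hmap : (S.map String.toList).Nodup := hnd.map (fun a b h => String.toList_inj.mp h)
  have hsub : S.map String.toList ⊆ UL := by
    intro l hl
    obtain ⟨y, hy, rfl⟩ := List.mem_map.mp hl
    obtain ⟨hne, c, hc, hsuf⟩ := hOK y hy
    obtain ⟨t, ht⟩ := hsuf
    rw [hUL, List.mem_flatMap]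
    refine ⟨c, hc, List.mem_map.mpr ⟨t.length, List.mem_range.mpr ?_, ?_⟩⟩
    · have hlen := congrArg List.length ht
      rw [List.length_append] at hlen
      have hpos : 0 < y.toList.length := List.length_pos_iff.mpr hne
      omega
    · rw [← ht, List.drop_left]
  calc S.length = (S.map String.toList).length := by rw [List.length_map]
    _ = (S.map String.toList).toFinset.card := (List.toFinset_card_of_nodup hmap).symm
    _ ≤ UL.toFinset.card := Finset.card_le_card (fun x hx => List.mem_toFinset.mpr (hsub (List.mem_toFinset.mp hx)))
    _ ≤ UL.length := List.toFinset_card_le UL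
    _ = pvBound code := hULlen

-- ---------- A-side loop lemmas ----------

theorem pv_loopA_sub (S0 : PySem.Set String) :
    ∀ (f : Nat) (S : PySem.Set String), ∀ y ∈ S, y ∈ pvLoopA S0 f S := by
  intro f
  induction f with
  | zero => intro S y hy; exact hy
  | succ f ih =>
      intro S y hy
      rw [pvLoopA]
      split
      · exact hy
      · exact ih _ _ ((PySem.Set.mem_union _ _ _).mpr (Or.inl hy))

theorem pv_loopA_sound (S0 : PySem.Set String) :
    ∀ (f : Nat) (S : PySem.Set String), (∀ y ∈ S, pvReach S0 y) →
      ∀ y ∈ pvLoopA S0 f S, pvReach S0 y := by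
  intro f
  induction f with
  | zero => intro S h y hy; exact h y hy
  | succ f ih =>
      intro S h y hy
      rw [pvLoopA] at hy
      split at hy
      · exact h y hy
      · refine ih _ ?_ y hy
        intro z hz
        rcases (PySem.Set.mem_union _ _ _).mp hz with hz | hz
        · exact h z hz
        · obtain ⟨s, hs, hPG⟩ := (pv_mem_dangA_PG _ _ _).mp hz
          exact pvReach.step (h s hs) hPG

theorem pv_loopA_fix (code : List String) :
    ∀ (f : Nat) (S : PySem.Set String), S.Nodup → (∀ y ∈ S, pvOK code y) →
      pvBound code < f + S.length →
      ∀ z ∈ pvDangA (PySem.Set.ofList code) (pvLoopA (PySem.Set.ofList code) f S),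
        z ∈ pvLoopA (PySem.Set.ofList code) f S := by
  intro f
  induction f with
  | zero =>
      intro S hnd hOK hfuel
      exact absurd (pv_card_le code S hnd hOK) (by omega)
  | succ f ih =>
      intro S hnd hOK hfuel
      rw [pvLoopA]
      split
      · rename_i heq
        intro z hz
        obtain ⟨s, hs, hPG⟩ := (pv_mem_dangA_PG _ _ _).mp hz
        have := (PySem.Set.equal_iff _ _).mp heq z
        exact this.mpr ((PySem.Set.mem_union _ _ _).mpr
          (Or.inr ((pv_mem_dangA_PG _ _ _).mpr ⟨s, hs, hPG⟩)))
      · rename_i hne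
        set U := PySem.Set.union S (pvDangA (PySem.Set.ofList code) S) with hU
        have hndU : U.Nodup := PySem.Set.nodup_union _ _ hnd
        have hOKU : ∀ y ∈ U, pvOK code y := by
          intro y hy
          rcases (PySem.Set.mem_union _ _ _).mp hy with hy | hy
          · exact hOK y hy
          · obtain ⟨s, hs, hPG⟩ := (pv_mem_dangA_PG _ _ _).mp hy
            exact pv_PG_OK code s y (Or.inr (hOK s hs)) hPG
        have hgrow : S.length < U.length := by
          classical
          have hsub : S.toFinset ⊆ U.toFinset := by
            intro x hx
            exact List.mem_toFinset.mpr ((PySem.Set.mem_union _ _ _).mpr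
              (Or.inl (List.mem_toFinset.mp hx)))
          have hneF : S.toFinset ≠ U.toFinset := by
            intro hEq
            apply hne
            rw [PySem.Set.equal_iff]
            intro x
            constructor
            · intro hx; exact (PySem.Set.mem_union _ _ _).mpr (Or.inl hx)
            · intro hx
              exact List.mem_toFinset.mp (hEq ▸ List.mem_toFinset.mpr hx)
          calc S.length = S.toFinset.card := (List.toFinset_card_of_nodup hnd).symm
            _ < U.toFinset.card := Finset.card_lt_card (lt_of_le_of_ne hsub hneF)
            _ = U.length := List.toFinset_card_of_nodup hndU
        exact ih U hndU hOKU (by omega)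

-- A's final set is exactly the reachable closure
theorem pv_A_closure (code : List String) (y : String) :
    y ∈ pvLoopA (PySem.Set.ofList code) (pvFuel code)
          (pvDangA (PySem.Set.ofList code) (PySem.Set.ofList code)) ↔
      pvReach (PySem.Set.ofList code) y := by
  set S0 := PySem.Set.ofList code with hS0
  set S1 := pvDangA S0 S0 with hS1
  have hS1nd : S1.Nodup := pv_nodup_dangA _ _
  have hS1OK : ∀ y ∈ S1, pvOK code y := by
    intro z hz
    obtain ⟨s, hs, hPG⟩ := (pv_mem_dangA_PG _ _ _).mp hz
    exact pv_PG_OK code s z (Or.inl hs) hPG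
  constructor
  · apply pv_loopA_sound
    intro z hz
    obtain ⟨s, hs, hPG⟩ := (pv_mem_dangA_PG _ _ _).mp hz
    exact pvReach.base hs hPG
  · intro hr
    induction hr with
    | base hs hPG =>
        exact pv_loopA_sub _ _ _ _ ((pv_mem_dangA_PG _ _ _).mpr ⟨_, hs, hPG⟩)
    | step _ hPG ih =>
        exact pv_loopA_fix code (pvFuel code) S1 hS1nd hS1OK (by simp [pvFuel]; omega) _
          ((pv_mem_dangA_PG _ _ _).mpr ⟨_, ih, hPG⟩)

theorem pv_A_true_iff (code : List String) :
    isprefixcode code = true ↔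
      ∀ y, pvReach (PySem.Set.ofList code) y → y ∉ PySem.Set.ofList code := by
  unfold isprefixcode
  dsimp only
  rw [beq_iff_eq, PySem.Set.len, Int.natCast_eq_zero, List.length_eq_zero_iff,
      List.eq_nil_iff_forall_not_mem]
  constructor
  · intro h y hr hy
    exact h y ((PySem.Set.mem_inter _ _ _).mpr ⟨(pv_A_closure code y).mpr hr, hy⟩)
  · intro h y hy
    obtain ⟨h1, h2⟩ := (PySem.Set.mem_inter _ _ _).mp hy
    exact h y ((pv_A_closure code y).mp h1) h2

-- ---------- B-side DFS lemmas ----------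

-- any set containing the base suffixes and closed under pvPG contains the whole closure
theorem pv_reach_min (S0 : PySem.Set String) (T : String → Prop)
    (hbase : ∀ s ∈ S0, ∀ y, pvPG S0 s y → T y)
    (hstep : ∀ s, T s → ∀ y, pvPG S0 s y → T y) :
    ∀ y, pvReach S0 y → T y := by
  intro y hr
  induction hr with
  | base hs hPG => exact hbase _ hs _ hPG
  | step _ hPG ih => exact hstep _ ih _ hPG

-- number of still-unvisited nodes of the suffix graph
def pvUnv (code : List String) (visited : PySem.Set String) : Nat :=
  ((pvNodes (PySem.Set.ofList code)).filter (fun y => decide (y ∉ visited))).length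

theorem pv_unv_succ (code : List String) (visited : PySem.Set String) (s : String)
    (hs : s ∈ pvNodes (PySem.Set.ofList code)) (hv : s ∉ visited) :
    pvUnv code (PySem.Set.add visited s) + 1 = pvUnv code visited := by
  unfold pvUnv
  have h1 : (pvNodes (PySem.Set.ofList code)).filter (fun y => decide (y ∉ PySem.Set.add visited s))
      = ((pvNodes (PySem.Set.ofList code)).filter (fun y => decide (y ∉ visited))).filter
          (fun y => y != s) := by
    rw [List.filter_filter]
    apply List.filter_congr
    intro y _
    by_cases h1 : y = s
    · simp [h1, PySem.Set.mem_add]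
    · by_cases h2 : y ∈ visited <;> simp [h1, h2, PySem.Set.mem_add]
  have hnd : ((pvNodes (PySem.Set.ofList code)).filter (fun y => decide (y ∉ visited))).Nodup :=
    (pv_nodup_nodes _).filter _
  have hmem : s ∈ (pvNodes (PySem.Set.ofList code)).filter (fun y => decide (y ∉ visited)) := by
    rw [List.mem_filter]
    exact ⟨hs, by simpa using hv⟩
  have hpos := List.length_pos_of_mem hmem
  rw [h1, ← hnd.erase_eq_filter, List.length_erase_of_mem hmem]
  omega

-- if the DFS answers False, some reachable suffix is a codeword
theorem pv_dfs_false (code : List String) :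
    ∀ (f : Nat) (visited : PySem.Set String) (stack : List String),
      (∀ y ∈ stack, pvReach (PySem.Set.ofList code) y) →
      pvDFS (PySem.Set.ofList code) (pvAdj (PySem.Set.ofList code)) f visited stack = false →
      ∃ y, pvReach (PySem.Set.ofList code) y ∧ y ∈ PySem.Set.ofList code := by
  intro f
  induction f with
  | zero => intro visited stack _ h; simp [pvDFS] at h
  | succ f ih =>
      intro visited stack hr h
      rw [pvDFS] at h
      rcases hlast : stack.getLast? with _ | s
      · rw [hlast] at h; simp at h
      · rw [hlast] at h
        dsimp only at h
        have hsmem : s ∈ stack := List.mem_of_getLast? hlast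
        have hrest : ∀ y ∈ stack.dropLast, pvReach (PySem.Set.ofList code) y :=
          fun y hy => hr y (List.dropLast_subset _ hy)
        split at h
        · exact ih _ _ hrest h
        · split at h
          · exact ⟨s, hr s hsmem, by assumption⟩
          · refine ih _ _ ?_ h
            intro y hy
            rcases List.mem_append.mp hy with hy | hy
            · exact hrest y hy
            · rw [pv_adj_getD] at hy
              split at hy
              · exact pvReach.step (hr s hsmem) ((pv_mem_succs _ _ _).mp hy)
              · exact absurd hy (List.not_mem_nil)

-- if the DFS answers True with enough fuel, no reachable suffix is a codeword
theorem pv_dfs_true (code : List String) :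
    ∀ (f : Nat) (visited : PySem.Set String) (stack : List String),
      visited.Nodup →
      (∀ y ∈ visited, pvOK code y) →
      (∀ y ∈ stack, pvOK code y) →
      (∀ y ∈ visited, y ∉ PySem.Set.ofList code) →
      (∀ s, (s ∈ PySem.Set.ofList code ∨ s ∈ visited) →
        ∀ y, pvPG (PySem.Set.ofList code) s y → y ∈ visited ∨ y ∈ stack) →
      stack.length + pvUnv code visited * (pvBound code + 1) ≤ f →
      pvDFS (PySem.Set.ofList code) (pvAdj (PySem.Set.ofList code)) f visited stack = true →
      ∀ y, pvReach (PySem.Set.ofList code) y → y ∉ PySem.Set.ofList code := by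
  intro f
  induction f with
  | zero =>
      intro visited stack _ _ _ hS0 hInv hfuel _
      have hstack : stack = [] := List.length_eq_zero_iff.mp (by omega)
      subst hstack
      intro y hy
      refine fun hy0 => hS0 y ?_ hy0
      refine pv_reach_min _ (fun z => z ∈ visited) ?_ ?_ y hy
      · intro s hs z hPG
        rcases hInv s (Or.inl hs) z hPG with hz | hz
        · exact hz
        · exact absurd hz (List.not_mem_nil)
      · intro s hsm z hPG
        rcases hInv s (Or.inr hsm) z hPG with hz | hz
        · exact hz
        · exact absurd hz (List.not_mem_nil)
  | succ f ih =>
      intro visited stack hnd hOKv hOKs hS0 hInv hfuel htrue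
      rw [pvDFS] at htrue
      rcases hlast : stack.getLast? with _ | s
      · -- empty stack: visited is closed and contains the base
        have hstack : stack = [] := List.getLast?_eq_none_iff.mp hlast
        subst hstack
        intro y hy
        refine fun hy0 => hS0 y ?_ hy0
        refine pv_reach_min _ (fun z => z ∈ visited) ?_ ?_ y hy
        · intro t ht z hPG
          rcases hInv t (Or.inl ht) z hPG with hz | hz
          · exact hz
          · exact absurd hz (List.not_mem_nil)
        · intro t htm z hPG
          rcases hInv t (Or.inr htm) z hPG with hz | hz
          · exact hz
          · exact absurd hz (List.not_mem_nil)
      · rw [hlast] at htrue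
        dsimp only at htrue
        have hsmem : s ∈ stack := List.mem_of_getLast? hlast
        have hsplit : stack.dropLast ++ [s] = stack := List.dropLast_append_getLast? s hlast
        have hOKrest : ∀ y ∈ stack.dropLast, pvOK code y :=
          fun y hy => hOKs y (List.dropLast_subset _ hy)
        have hlenrest : stack.dropLast.length + 1 = stack.length := by
          rw [← hsplit, List.length_append]; simp
        by_cases hvis : s ∈ visited
        · -- revisit: pop only
          rw [if_pos hvis] at htrue
          refine ih visited stack.dropLast hnd hOKv hOKrest hS0 ?_ (by omega) htrue
          intro t ht z hPG
          rcases hInv t ht z hPG with hz | hz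
          · exact Or.inl hz
          · rw [← hsplit] at hz
            rcases List.mem_append.mp hz with hz | hz
            · exact Or.inr hz
            · rw [List.mem_singleton] at hz
              exact Or.inl (hz ▸ hvis)
        · rw [if_neg hvis] at htrue
          by_cases hw : s ∈ PySem.Set.ofList code
          · rw [if_pos hw] at htrue
            exact absurd htrue (by simp)
          · rw [if_neg hw] at htrue
            -- new visit
            have hsOK : pvOK code s := hOKs s hsmem
            have hsnode : s ∈ pvNodes (PySem.Set.ofList code) := (pv_mem_nodes code s).mpr hsOK
            have hadj : (pvAdj (PySem.Set.ofList code)).getD s PySem.Set.empty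
                = pvSuccs (PySem.Set.ofList code) s := by
              rw [pv_adj_getD]; simp [hsnode]
            have hdeg : (pvSuccs (PySem.Set.ofList code) s).length ≤ pvBound code := by
              refine pv_card_le code _ (pv_nodup_succs _ _) ?_
              intro y hy
              exact pv_PG_OK code s y (Or.inr hsOK) ((pv_mem_succs _ _ _).mp hy)
            have hcount := pv_unv_succ code visited s hsnode hvis
            refine ih (PySem.Set.add visited s)
              (stack.dropLast ++ (pvAdj (PySem.Set.ofList code)).getD s PySem.Set.empty)
              (PySem.Set.nodup_add _ _ hnd) ?_ ?_ ?_ ?_ ?_ htrue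
            · intro y hy
              rcases (PySem.Set.mem_add _ _ _).mp hy with hy | hy
              · exact hOKv y hy
              · exact hy ▸ hsOK
            · intro y hy
              rcases List.mem_append.mp hy with hy | hy
              · exact hOKrest y hy
              · rw [hadj] at hy
                exact pv_PG_OK code s y (Or.inr hsOK) ((pv_mem_succs _ _ _).mp hy)
            · intro y hy
              rcases (PySem.Set.mem_add _ _ _).mp hy with hy | hy
              · exact hS0 y hy
              · exact hy ▸ hw
            · intro t ht z hPG
              rcases ht with ht | ht
              · rcases hInv t (Or.inl ht) z hPG with hz | hz
                · exact Or.inl ((PySem.Set.mem_add _ _ _).mpr (Or.inl hz))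
                · rw [← hsplit] at hz
                  rcases List.mem_append.mp hz with hz | hz
                  · exact Or.inr (List.mem_append.mpr (Or.inl hz))
                  · rw [List.mem_singleton] at hz
                    exact Or.inl ((PySem.Set.mem_add _ _ _).mpr (Or.inr hz))
              · rcases (PySem.Set.mem_add _ _ _).mp ht with ht | ht
                · rcases hInv t (Or.inr ht) z hPG with hz | hz
                  · exact Or.inl ((PySem.Set.mem_add _ _ _).mpr (Or.inl hz))
                  · rw [← hsplit] at hz
                    rcases List.mem_append.mp hz with hz | hz
                    · exact Or.inr (List.mem_append.mpr (Or.inl hz))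
                    · rw [List.mem_singleton] at hz
                      exact Or.inl ((PySem.Set.mem_add _ _ _).mpr (Or.inr hz))
                · subst ht
                  refine Or.inr (List.mem_append.mpr (Or.inr ?_))
                  rw [hadj]
                  exact (pv_mem_succs _ _ _).mpr hPG
            · rw [List.length_append, hadj]
              have hsum : pvUnv code visited * (pvBound code + 1)
                  = pvUnv code (PySem.Set.add visited s) * (pvBound code + 1)
                    + (pvBound code + 1) := by
                rw [← hcount]; ring
              omega

theorem pv_B_true_iff (code : List String) :
    isprefixcode_alt code = true ↔
      ∀ y, pvReach (PySem.Set.ofList code) y → y ∉ PySem.Set.ofList code := by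
  constructor
  · intro h
    unfold isprefixcode_alt at h
    dsimp only at h
    have hOKinit : ∀ y ∈ pvInitB (PySem.Set.ofList code), pvOK code y := by
      intro y hy
      obtain ⟨s, hs, hPG⟩ := (pv_mem_initB _ _).mp hy
      exact pv_PG_OK code s y (Or.inl hs) hPG
    have hlen1 : (pvInitB (PySem.Set.ofList code)).length ≤ pvBound code :=
      pv_card_le code _ (pv_nodup_initB _) hOKinit
    have hlen2 : pvUnv code PySem.Set.empty ≤ pvBound code := by
      unfold pvUnv
      have : (pvNodes (PySem.Set.ofList code)).filter
          (fun y => decide (y ∉ PySem.Set.empty)) = pvNodes (PySem.Set.ofList code) := by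
        apply List.filter_eq_self.mpr
        intro y _
        simp [PySem.Set.empty]
      rw [this]
      exact pv_card_le code _ (pv_nodup_nodes _) (fun y hy => (pv_mem_nodes code y).mp hy)
    refine pv_dfs_true code (pvFuelB code) PySem.Set.empty (pvInitB (PySem.Set.ofList code))
      (by simp [PySem.Set.empty]) (by simp [PySem.Set.empty]) hOKinit
      (by simp [PySem.Set.empty]) ?_ ?_ h
    · intro s hs y hPG
      rcases hs with hs | hs
      · exact Or.inr ((pv_mem_initB _ _).mpr ⟨s, hs, hPG⟩)
      · exact absurd hs (List.not_mem_nil)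
    · unfold pvFuelB
      nlinarith [hlen1, hlen2]
  · intro h
    rcases hB : isprefixcode_alt code with _ | _
    · exfalso
      unfold isprefixcode_alt at hB
      dsimp only at hB
      have hfr : ∀ z ∈ pvInitB (PySem.Set.ofList code), pvReach (PySem.Set.ofList code) z := by
        intro z hz
        obtain ⟨s, hs, hPG⟩ := (pv_mem_initB _ _).mp hz
        exact pvReach.base hs hPG
      obtain ⟨y, hr, hy⟩ := pv_dfs_false code (pvFuelB code) PySem.Set.empty
        (pvInitB (PySem.Set.ofList code)) hfr hB
      exact h y hr hy
    · rfl

-- ===== VERDICT (by name: the statement is the Claim_ definition above) =====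
theorem isprefixcode_spec : Claim_equal_isprefixcode := by
  intro code _
  unfold Spec_isprefixcode
  rw [Bool.eq_iff_iff, pv_A_true_iff, pv_B_true_iff]
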